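-- pv_equiv track=rewrite | github.com/chiyuki0325/my-scripts | wmc/wmc.py | strip_maidata
-- ===== SOURCE A (Python) =====
-- def strip_maidata(maidata: str) -> str:
--     lines = []
--     started = False
--     for line in maidata.split("\n"):
--         if line.startswith("("):
--             started = True
--         if started:
--             lines.append(line)
--     return "\n".join(lines).strip()
-- ===== SOURCE B (Python) =====
-- def strip_maidata(maidata: str) -> str:
--     # No line splitting: a kept region begins either at the very start (if the
--     # whole text starts with "(") or right after the first "\n(" occurrence.
--     if maidata.startswith("("):
--         return maidata.strip()
--     i = maidata.find("\n(")
--     if i != -1: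
--         return maidata[i + 1:].strip()
--     return ""
-- ===== Notes on version B (the rewrite author's own statement) =====
-- stated objective: alternative
-- what changed: Works on the raw string instead of splitting into lines: the kept region starts at index 0 if the text starts with '(' and otherwise right after the first substring '\n(', found by a single substring search, then sliced and stripped; no line list is ever built.
import Mathlib
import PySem

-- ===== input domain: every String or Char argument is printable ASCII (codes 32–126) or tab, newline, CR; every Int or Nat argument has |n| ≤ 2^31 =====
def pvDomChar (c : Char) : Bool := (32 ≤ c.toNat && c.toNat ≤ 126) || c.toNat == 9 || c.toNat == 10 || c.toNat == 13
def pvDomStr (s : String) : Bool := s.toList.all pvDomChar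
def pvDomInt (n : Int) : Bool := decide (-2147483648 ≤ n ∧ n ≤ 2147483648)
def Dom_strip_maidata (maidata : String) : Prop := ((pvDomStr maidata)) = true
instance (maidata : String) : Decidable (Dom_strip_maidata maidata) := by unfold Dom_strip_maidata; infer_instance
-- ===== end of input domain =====

-- B avoids splitting into lines: the kept region starts at index 0 if the text starts
-- with "(" and otherwise right after the first "\n(" substring (one substring search),
-- then slice and strip (alternative decomposition, same cost).

-- ===== PORT A =====
-- the for loop of A: state (started, lines-accumulator)
def stripALoop : List String → Bool → List String → List String
  | [], _, acc => acc
  | l :: rest, started, acc =>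
    let started' := started || PySem.Str.startswith l "("
    stripALoop rest started' (if started' then acc ++ [l] else acc)

def strip_maidata (maidata : String) : String :=
  PySem.Str.strip (PySem.Str.join "\n" (stripALoop ((PySem.Str.split? maidata "\n").getD []) false []))

-- ===== PORT B =====
def strip_maidata_alt (maidata : String) : String :=
  if PySem.Str.startswith maidata "(" then PySem.Str.strip maidata
  else
    let i := PySem.Str.find maidata "\n("
    if i ≠ -1 then PySem.Str.strip (PySem.Str.slice maidata (some (i + 1)) none)
    else ""

-- ===== PRECONDITION & SPEC =====
def Spec_strip_maidata (maidata : String) (out : String) : Prop := out = strip_maidata_alt maidata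
instance (maidata : String) (out : String) : Decidable (Spec_strip_maidata maidata out) := by unfold Spec_strip_maidata; infer_instance

-- ===== CLAIM (what is proved, stated in full; the proofs are below) =====
def Claim_equal_strip_maidata : Prop := ∀ (maidata : String), Dom_strip_maidata maidata → Spec_strip_maidata maidata (strip_maidata maidata)

-- ===== LEMMAS AND PROOFS =====

-- A's result seen as find-the-first-'('-line over the line list (String level)
def stripBLoop : List String → String
  | [] => ""
  | l :: rest =>
    if PySem.Str.startswith l "(" then PySem.Str.strip (PySem.Str.join "\n" (l :: rest))
    else stripBLoop rest

theorem stripALoop_acc (lines : List String) (s : Bool) (acc : List String) :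
    stripALoop lines s acc = acc ++ stripALoop lines s [] := by
  induction lines generalizing s acc with
  | nil => simp [stripALoop]
  | cons l rest ih =>
    simp only [stripALoop]
    split_ifs with h
    · rw [ih _ (acc ++ [l]), ih _ ([] ++ [l])]; simp
    · exact ih _ _

theorem stripALoop_started (lines : List String) :
    stripALoop lines true [] = lines := by
  induction lines with
  | nil => rfl
  | cons l rest ih =>
    simp only [stripALoop, Bool.true_or]
    rw [stripALoop_acc, ih]; simp

theorem stripA_eq_BLoop (lines : List String) :
    PySem.Str.strip (PySem.Str.join "\n" (stripALoop lines false [])) = stripBLoop lines := by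
  induction lines with
  | nil => decide
  | cons l rest ih =>
    simp only [stripALoop, Bool.false_or, stripBLoop]
    by_cases h : PySem.Str.startswith l "(" = true
    · rw [if_pos h, if_pos h, stripALoop_acc, h, stripALoop_started]; simp
    · have hf : PySem.Str.startswith l "(" = false := by rwa [Bool.not_eq_true] at h
      rw [if_neg h, if_neg h, hf]
      exact ih

-- char-level splitting on '\n', structurally
def consFirst (pre : List Char) : List (List Char) → List (List Char)
  | [] => [pre]
  | x :: xs => (pre ++ x) :: xs

def pyLines : List Char → List (List Char)
  | [] => [[]]
  | c :: rest => if c = '\n' then [] :: pyLines rest else consFirst [c] (pyLines rest)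

-- char-level images of the two programs
def charsB : List (List Char) → List Char
  | [] => []
  | l :: rest =>
    if PySem.Chars.startswith l ['('] then PySem.Chars.strip (PySem.Chars.join ['\n'] (l :: rest))
    else charsB rest

def altChars (cs : List Char) : List Char :=
  if PySem.Chars.startswith cs ['('] then PySem.Chars.strip cs
  else
    let i := PySem.Chars.find cs ['\n', '(']
    if i ≠ -1 then PySem.Chars.strip (cs.drop (i.toNat + 1))
    else []

theorem pyLines_ne_nil (cs : List Char) : pyLines cs ≠ [] := by
  cases cs with
  | nil => simp [pyLines]
  | cons c rest =>
    simp only [pyLines]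
    split_ifs
    · simp
    · cases h : pyLines rest <;> simp [consFirst]

-- structure of pyLines: either no newline, or a first segment before the first newline
theorem pyLines_structure (cs : List Char) :
    ('\n' ∉ cs ∧ pyLines cs = [cs]) ∨
    (∃ a b, cs = a ++ '\n' :: b ∧ '\n' ∉ a ∧ pyLines cs = a :: pyLines b) := by
  induction cs with
  | nil => exact Or.inl ⟨by simp, rfl⟩
  | cons c rest ih =>
    by_cases hc : c = '\n'
    · subst hc
      exact Or.inr ⟨[], rest, by simp, by simp, by simp [pyLines]⟩
    · have hstep : pyLines (c :: rest) = consFirst [c] (pyLines rest) := by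
        simp only [pyLines]
        rw [if_neg hc]
      rcases ih with ⟨hnl, heq⟩ | ⟨a, b, hcs, hnl, heq⟩
      · refine Or.inl ⟨?_, ?_⟩
        · simp only [List.mem_cons, not_or]
          exact ⟨Ne.symm hc, hnl⟩
        · rw [hstep, heq]; rfl
      · refine Or.inr ⟨c :: a, b, by simp [hcs], ?_, ?_⟩
        · simp only [List.mem_cons, not_or]
          exact ⟨Ne.symm hc, hnl⟩
        · rw [hstep, heq]
          simp [consFirst]

theorem join_pyLines (cs : List Char) : PySem.Chars.join ['\n'] (pyLines cs) = cs := by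
  induction cs with
  | nil => simp [pyLines, PySem.Chars.join_singleton]
  | cons c rest ih =>
    by_cases hc : c = '\n'
    · subst hc
      have hstep : pyLines ('\n' :: rest) = [] :: pyLines rest := by
        simp [pyLines]
      rw [hstep]
      cases h : pyLines rest with
      | nil => exact absurd h (pyLines_ne_nil rest)
      | cons x xs =>
        rw [PySem.Chars.join_cons_cons]
        rw [h] at ih
        simp [ih]
    · have hstep : pyLines (c :: rest) = consFirst [c] (pyLines rest) := by
        simp only [pyLines]
        rw [if_neg hc]
      rw [hstep]
      cases h : pyLines rest with
      | nil => exact absurd h (pyLines_ne_nil rest)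
      | cons x xs =>
        rw [h] at ih
        cases xs with
        | nil =>
          simp only [consFirst, PySem.Chars.join_singleton] at *
          simp [ih]
        | cons y ys =>
          simp only [consFirst, PySem.Chars.join_cons_cons] at *
          simp [ih]

-- startswith '(' facts
theorem startswith_paren_iff (cs : List Char) :
    PySem.Chars.startswith cs ['('] = true ↔ ∃ t, cs = '(' :: t := by
  rw [PySem.Chars.startswith_iff]
  constructor
  · rintro ⟨u, rfl⟩
    exact ⟨u, rfl⟩
  · rintro ⟨t, rfl⟩
    exact ⟨t, rfl⟩

theorem startswith_paren_cons (c : Char) (t : List Char) :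
    PySem.Chars.startswith (c :: t) ['('] = (c == '(') := by
  by_cases h : c = '('
  · subst h
    simp only [beq_self_eq_true]
    exact (startswith_paren_iff _).mpr ⟨t, rfl⟩
  · have hb : (c == '(') = false := by simpa using h
    rw [hb, Bool.eq_false_iff]
    intro hs
    rcases (startswith_paren_iff _).mp hs with ⟨u, hu⟩
    injection hu with h1 h2
    exact h h1

theorem startswith_append_newline (a b : List Char) :
    PySem.Chars.startswith (a ++ '\n' :: b) ['('] = PySem.Chars.startswith a ['('] := by
  cases a with
  | nil =>
    rw [List.nil_append, startswith_paren_cons]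
    decide
  | cons c t =>
    rw [List.cons_append, startswith_paren_cons, startswith_paren_cons]

-- find shift lemma (sub nonempty)
theorem findgo_shift (sub : List Char) (hsub : sub ≠ []) :
    ∀ (l : List Char) (k : Nat), PySem.Chars.find.go sub l k =
      if PySem.Chars.find l sub = -1 then -1 else PySem.Chars.find l sub + k := by
  intro l
  induction l with
  | nil =>
    intro k
    simp [PySem.Chars.find, PySem.Chars.find.go, List.isEmpty_iff, hsub]
  | cons c t ih =>
    intro k
    by_cases hp : sub.isPrefixOf (c :: t) = true
    · simp [PySem.Chars.find, PySem.Chars.find.go, hp]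
    · have hp' : sub.isPrefixOf (c :: t) = false := by rwa [Bool.not_eq_true] at hp
      simp only [PySem.Chars.find, PySem.Chars.find.go, hp', Bool.false_eq_true, if_false]
      rw [ih (k + 1), ih 1]
      have hge := PySem.Chars.neg_one_le_find t sub
      by_cases h : PySem.Chars.find t sub = -1
      · simp [h]
      · simp only [if_neg h]
        rw [if_neg (show ¬(PySem.Chars.find t sub + ((1 : Nat) : Int) = -1) by omega)]
        push_cast
        ring

theorem find_cons (sub : List Char) (hsub : sub ≠ []) (c : Char) (t : List Char) :
    PySem.Chars.find (c :: t) sub =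
      if sub.isPrefixOf (c :: t) then 0
      else if PySem.Chars.find t sub = -1 then -1 else PySem.Chars.find t sub + 1 := by
  by_cases hp : sub.isPrefixOf (c :: t) = true
  · simp [PySem.Chars.find, PySem.Chars.find.go, hp]
  · have hp' : sub.isPrefixOf (c :: t) = false := by rwa [Bool.not_eq_true] at hp
    simp only [PySem.Chars.find, PySem.Chars.find.go, hp', Bool.false_eq_true, if_false]
    rw [findgo_shift sub hsub t 1]
    rfl

theorem find_no_newline (cs : List Char) (h : '\n' ∉ cs) :
    PySem.Chars.find cs ['\n', '('] = -1 := by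
  rw [PySem.Chars.find_eq_neg_one_iff]
  intro hinf
  exact h (hinf.subset (by simp))

-- find over a ++ '\n' :: b when b starts with '('
theorem find_hit (a b : List Char) (ha : '\n' ∉ a) (hb : PySem.Chars.startswith b ['('] = true) :
    PySem.Chars.find (a ++ '\n' :: b) ['\n', '('] = a.length := by
  induction a with
  | nil =>
    rcases (startswith_paren_iff b).mp hb with ⟨t, ht⟩
    subst ht
    rw [List.nil_append, find_cons ['\n', '('] (by simp) '\n' ('(' :: t)]
    rw [if_pos (by simp [List.isPrefixOf])]
    simp
  | cons c a' ih =>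
    have hc : c ≠ '\n' := fun h => ha (h ▸ List.mem_cons_self ..)
    have ha' : '\n' ∉ a' := fun h => ha (List.mem_cons_of_mem _ h)
    have hbeq : ('\n' == c) = false := beq_eq_false_iff_ne.mpr (Ne.symm hc)
    have hpre : (['\n', '('] : List Char).isPrefixOf (c :: (a' ++ '\n' :: b)) = false := by
      simp [List.isPrefixOf, hbeq]
    rw [List.cons_append, find_cons ['\n', '('] (by simp) c (a' ++ '\n' :: b), hpre,
      if_neg (by simp), ih ha']
    rw [if_neg (by omega)]
    push_cast [List.length_cons]
    ring

-- find over a ++ '\n' :: b when b does NOT start with '('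
theorem find_miss (a b : List Char) (ha : '\n' ∉ a)
    (hb : PySem.Chars.startswith b ['('] = false) :
    PySem.Chars.find (a ++ '\n' :: b) ['\n', '('] =
      if PySem.Chars.find b ['\n', '('] = -1 then -1
      else PySem.Chars.find b ['\n', '('] + (a.length + 1) := by
  induction a with
  | nil =>
    have hpre : (['\n', '('] : List Char).isPrefixOf ('\n' :: b) = false := by
      cases b with
      | nil => decide
      | cons x t =>
        rw [startswith_paren_cons] at hb
        have hb' : ('(' == x) = false := beq_eq_false_iff_ne.mpr (Ne.symm (beq_eq_false_iff_ne.mp hb))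
        simp [List.isPrefixOf, hb']
    rw [List.nil_append, find_cons ['\n', '('] (by simp) '\n' b, hpre, if_neg (by simp)]
    split_ifs with h
    · rfl
    · simp
  | cons c a' ih =>
    have hc : c ≠ '\n' := fun h => ha (h ▸ List.mem_cons_self ..)
    have hbeq : ('\n' == c) = false := beq_eq_false_iff_ne.mpr (Ne.symm hc)
    have hpre : (['\n', '('] : List Char).isPrefixOf (c :: (a' ++ '\n' :: b)) = false := by
      simp [List.isPrefixOf, hbeq]
    have ih' := ih (fun h => ha (List.mem_cons_of_mem _ h))
    rw [List.cons_append, find_cons ['\n', '('] (by simp) c (a' ++ '\n' :: b), hpre,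
      if_neg (by simp), ih']
    have hge := PySem.Chars.neg_one_le_find b ['\n', '(']
    by_cases h : PySem.Chars.find b ['\n', '('] = -1
    · simp [h]
    · simp only [if_neg h]
      rw [if_neg (show ¬(PySem.Chars.find b ['\n', '('] + (((a'.length : Nat) : Int) + 1) = -1) by omega)]
      push_cast [List.length_cons]
      ring

-- main char-level lemma
theorem drop_seg (a b : List Char) (m : Nat) :
    (a ++ '\n' :: b).drop (a.length + 1 + m) = b.drop m := by
  have h1 : a ++ '\n' :: b = (a ++ ['\n']) ++ b := by simp
  have h2 : a.length + 1 = (a ++ ['\n']).length := by simp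
  rw [h1, h2, ← List.drop_drop, List.drop_left]

theorem charsB_pyLines (cs : List Char) : charsB (pyLines cs) = altChars cs := by
  induction hn : cs.length using Nat.strong_induction_on generalizing cs with
  | _ n ih =>
  subst hn
  rcases pyLines_structure cs with ⟨hnl, heq⟩ | ⟨a, b, hcs, hnl, heq⟩
  · rw [heq]
    by_cases hs : PySem.Chars.startswith cs ['('] = true
    · simp only [charsB, hs, if_pos, altChars, PySem.Chars.join_singleton]
    · have hs' : PySem.Chars.startswith cs ['('] = false := by rwa [Bool.not_eq_true] at hs
      simp only [charsB, hs', Bool.false_eq_true, if_false, altChars]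
      rw [find_no_newline cs hnl]
      simp
  · subst hcs
    by_cases hs : PySem.Chars.startswith (a ++ '\n' :: b) ['('] = true
    · have hsa : PySem.Chars.startswith a ['('] = true := by
        rwa [startswith_append_newline] at hs
      rw [heq]
      simp only [charsB, hsa, if_pos]
      rw [← heq, join_pyLines, altChars, if_pos hs]
    · have hs' : PySem.Chars.startswith (a ++ '\n' :: b) ['('] = false := by
        rwa [Bool.not_eq_true] at hs
      have hsa : PySem.Chars.startswith a ['('] = false := by
        rwa [startswith_append_newline] at hs'
      rw [heq]
      simp only [charsB, hsa, Bool.false_eq_true, if_false]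
      have hblen : b.length < (a ++ '\n' :: b).length := by
        simp only [List.length_append, List.length_cons]
        omega
      have hb := ih b.length hblen b rfl
      rw [hb]
      by_cases hbs : PySem.Chars.startswith b ['('] = true
      · -- b starts with '(' : find hits right after a
        have hf := find_hit a b hnl hbs
        have hL : altChars b = PySem.Chars.strip b := by
          simp only [altChars, hbs, if_pos]
        have hdrop : (a ++ '\n' :: b).drop (((a.length : Int)).toNat + 1) = b := by
          have ht : ((a.length : Int)).toNat = a.length := by omega
          rw [ht]
          exact drop_seg a b 0
        rw [hL]
        simp only [altChars, hs', Bool.false_eq_true, if_false, hf]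
        rw [if_pos (show ((a.length : Int)) ≠ -1 by omega), hdrop]
      · have hbs' : PySem.Chars.startswith b ['('] = false := by rwa [Bool.not_eq_true] at hbs
        have hf := find_miss a b hnl hbs'
        have hge := PySem.Chars.neg_one_le_find b ['\n', '(']
        by_cases hfb : PySem.Chars.find b ['\n', '('] = -1
        · have hL : altChars b = [] := by
            simp only [altChars, hbs', Bool.false_eq_true, if_false]
            rw [if_neg (by simp [hfb])]
          have hR : altChars (a ++ '\n' :: b) = [] := by
            simp only [altChars, hs', Bool.false_eq_true, if_false]
            rw [hf, if_pos hfb, if_neg (by simp)]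
          rw [hL, hR]
        · have hL : altChars b
              = PySem.Chars.strip (b.drop ((PySem.Chars.find b ['\n', '(']).toNat + 1)) := by
            simp only [altChars, hbs', Bool.false_eq_true, if_false]
            rw [if_pos hfb]
          have hfcs : PySem.Chars.find (a ++ '\n' :: b) ['\n', '(']
              = PySem.Chars.find b ['\n', '('] + ((a.length : Int) + 1) := by
            rw [hf, if_neg hfb]
          have harith : (PySem.Chars.find b ['\n', '('] + ((a.length : Int) + 1)).toNat + 1
              = a.length + 1 + ((PySem.Chars.find b ['\n', '(']).toNat + 1) := by omega
          have hR : altChars (a ++ '\n' :: b)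
              = PySem.Chars.strip (b.drop ((PySem.Chars.find b ['\n', '(']).toNat + 1)) := by
            simp only [altChars, hs', Bool.false_eq_true, if_false, hfcs]
            rw [if_pos (show PySem.Chars.find b ['\n', '('] + ((a.length : Int) + 1) ≠ -1 by omega)]
            rw [harith, drop_seg]
          rw [hL, hR]

-- splitOn on "\n" computes pyLines
theorem splitOn_go_pyLines (fuel : Nat) :
    ∀ (l cur : List Char) (acc : List (List Char)), l.length < fuel →
      PySem.Chars.splitOn.go ['\n'] fuel l cur acc =
        acc.reverse ++ consFirst cur.reverse (pyLines l) := by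
  induction fuel with
  | zero => intro l cur acc h; omega
  | succ f ihf =>
    intro l cur acc h
    cases l with
    | nil =>
      simp [PySem.Chars.splitOn.go, pyLines, consFirst]
    | cons c rest =>
      by_cases hc : c = '\n'
      · subst hc
        have hp : (['\n'] : List Char).isPrefixOf ('\n' :: rest) = true := by
          simp [List.isPrefixOf]
        simp only [PySem.Chars.splitOn.go, hp, if_pos]
        have : List.drop (['\n'] : List Char).length ('\n' :: rest) = rest := by simp
        rw [this, ihf rest [] (cur.reverse :: acc) (by simpa using Nat.lt_of_succ_lt_succ h)]
        simp only [pyLines]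
        cases hpl : pyLines rest with
        | nil => exact absurd hpl (pyLines_ne_nil rest)
        | cons x xs => simp [consFirst]
      · have hbeq : ('\n' == c) = false := beq_eq_false_iff_ne.mpr (Ne.symm hc)
        have hp : (['\n'] : List Char).isPrefixOf (c :: rest) = false := by
          simp [List.isPrefixOf, hbeq]
        simp only [PySem.Chars.splitOn.go, hp, Bool.false_eq_true, if_false]
        rw [ihf rest (c :: cur) acc (by simpa using Nat.lt_of_succ_lt_succ h)]
        simp only [pyLines, hc, if_false]
        cases hpl : pyLines rest with
        | nil => exact absurd hpl (pyLines_ne_nil rest)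
        | cons x xs => simp [consFirst]

theorem splitOn_newline (cs : List Char) :
    PySem.Chars.splitOn cs ['\n'] = pyLines cs := by
  rw [PySem.Chars.splitOn, splitOn_go_pyLines (cs.length + 1) cs [] [] (by omega)]
  cases hpl : pyLines cs with
  | nil => exact absurd hpl (pyLines_ne_nil cs)
  | cons x xs => simp [consFirst]

-- String-level bridges
theorem str_paren_toList : ("(" : String).toList = ['('] := by decide
theorem str_nl_toList : ("\n" : String).toList = ['\n'] := by decide
theorem str_nlparen_toList : ("\n(" : String).toList = ['\n', '('] := by decide

theorem stripBLoop_toList (L : List String) :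
    (stripBLoop L).toList = charsB (L.map String.toList) := by
  induction L with
  | nil => simp [stripBLoop, charsB]
  | cons l rest ih =>
    have hsw : PySem.Str.startswith l "(" = PySem.Chars.startswith l.toList ['('] := by
      rw [PySem.Str.startswith_eq, str_paren_toList]
    simp only [stripBLoop, charsB, List.map_cons]
    by_cases h : PySem.Str.startswith l "(" = true
    · have hc : PySem.Chars.startswith l.toList ['('] = true := by rw [← hsw]; exact h
      rw [if_pos h, if_pos hc, PySem.Str.toList_strip, PySem.Str.toList_join, str_nl_toList]
      simp
    · have hc : ¬ PySem.Chars.startswith l.toList ['('] = true := by rw [← hsw]; exact h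
      rw [if_neg h, if_neg hc]
      exact ih

theorem alt_toList (s : String) :
    (strip_maidata_alt s).toList = altChars s.toList := by
  have hsw : PySem.Str.startswith s "(" = PySem.Chars.startswith s.toList ['('] := by
    rw [PySem.Str.startswith_eq, str_paren_toList]
  have hfd : PySem.Str.find s "\n(" = PySem.Chars.find s.toList ['\n', '('] := by
    rw [PySem.Str.find_eq, str_nlparen_toList]
  simp only [strip_maidata_alt, altChars]
  by_cases ha : PySem.Str.startswith s "(" = true
  · have hc : PySem.Chars.startswith s.toList ['('] = true := by rw [← hsw]; exact ha
    rw [if_pos ha, if_pos hc]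
    exact PySem.Str.toList_strip s
  · have hc : ¬ PySem.Chars.startswith s.toList ['('] = true := by rw [← hsw]; exact ha
    rw [if_neg ha, if_neg hc]
    by_cases hb : PySem.Str.find s "\n(" ≠ -1
    · have hcb : PySem.Chars.find s.toList ['\n', '('] ≠ -1 := by rw [← hfd]; exact hb
      rw [if_pos hb, if_pos hcb, PySem.Str.toList_strip, PySem.Str.toList_slice]
      have hge := PySem.Chars.neg_one_le_find s.toList ['\n', '(']
      rw [hfd, PySem.Chars.slice_eq_listSlice, PySem.List.slice_from _ (by omega)]
      have ht : (PySem.Chars.find s.toList ['\n', '('] + 1).toNat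
          = (PySem.Chars.find s.toList ['\n', '(']).toNat + 1 := by omega
      rw [ht]
    · have hcb : ¬ PySem.Chars.find s.toList ['\n', '('] ≠ -1 := by rw [← hfd]; exact hb
      rw [if_neg hb, if_neg hcb]
      decide

-- lines of the split, bridged
theorem split_lines (s : String) :
    (((PySem.Str.split? s "\n").getD []).map String.toList) = pyLines s.toList := by
  have h := PySem.Str.split?_map s "\n"
  have hsep : ("\n" : String).toList = ['\n'] := by decide
  rw [hsep] at h
  rw [PySem.Chars.split?] at h
  simp only [List.isEmpty_iff, if_neg (by simp : ¬(['\n'] : List Char) = [])] at h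
  cases hs : PySem.Str.split? s "\n" with
  | none => rw [hs] at h; simp at h
  | some L =>
    rw [hs] at h
    simp only [Option.map_some] at h
    injection h with h
    simpa [splitOn_newline] using h

-- ===== VERDICT (by name: the statement is the Claim_ definition above) =====
theorem strip_maidata_spec : Claim_equal_strip_maidata := by
  intro maidata _
  unfold Spec_strip_maidata strip_maidata
  rw [stripA_eq_BLoop]
  rw [← String.toList_inj, stripBLoop_toList, split_lines, charsB_pyLines, alt_toList]
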